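-- pv_equiv track=rewrite | github.com/pypi-data/pypi-mirror-401 | packages/xython/xython-4.2.0.tar.gz/xython-4.2.0/src/xython/xy_util.py | change_text_to_l1d_by_step
-- ===== SOURCE A (Python) =====
-- def change_text_to_l1d_by_step(input_data, input_list):
-- 	"""
-- 	입력문자를 숫자만큼씨 짤라서 리스트로 만드는 것
--
-- 	:param input_data:
-- 	:param input_list:
-- 	:return:
-- 	"""
-- 	result = []
-- 	total_len = 0
-- 	start_no = 0
-- 	for no in range(len(input_list)):
-- 		if no != 0:
-- 			start_no = total_len
-- 		end_len = input_list[no]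
-- 		result.append(input_data[start_no:start_no + end_len])
-- 		total_len = total_len + end_len
-- 	return result
-- ===== SOURCE B (Python) =====
-- def change_text_to_l1d_by_step(input_data, input_list):
--     # Divide and conquer: cut the left half of the step list, then the right
--     # half starting at offset shifted by the sum of the left half's steps.
--     def cut(lst, base):
--         if not lst:
--             return []
--         if len(lst) == 1:
--             step = lst[0]
--             return [input_data[base:base + step]]
--         mid = len(lst) // 2
--         left, right = lst[:mid], lst[mid:]
--         return cut(left, base) + cut(right, base + sum(left))
--     return cut(input_list, 0)
-- ===== Notes on version B (the rewrite author's own statement) =====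
-- stated objective: alternative
-- what changed: B is a divide-and-conquer recursion: it splits the step list in half, cuts the left half at the current base offset and the right half at base plus the sum of the left steps, instead of A's single index loop threading a mutable running offset; correctness follows because chunk starts depend only on the sum of the preceding steps.
import Mathlib
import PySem

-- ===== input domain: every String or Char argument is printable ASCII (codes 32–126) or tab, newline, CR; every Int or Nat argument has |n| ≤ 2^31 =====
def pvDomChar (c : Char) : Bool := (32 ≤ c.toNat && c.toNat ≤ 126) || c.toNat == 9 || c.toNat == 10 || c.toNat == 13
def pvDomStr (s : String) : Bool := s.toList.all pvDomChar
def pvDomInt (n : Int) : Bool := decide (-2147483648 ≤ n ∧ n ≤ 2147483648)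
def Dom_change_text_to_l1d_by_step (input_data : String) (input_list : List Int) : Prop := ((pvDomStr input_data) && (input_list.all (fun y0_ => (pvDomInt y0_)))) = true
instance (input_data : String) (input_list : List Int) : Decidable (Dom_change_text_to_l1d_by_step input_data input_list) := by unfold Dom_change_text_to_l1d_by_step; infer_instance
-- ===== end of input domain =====

-- B replaces A's single index loop with a mutable running offset by a
-- divide-and-conquer recursion on the step list (objective: alternative).

-- ===== PORT A =====
def change_text_to_l1d_by_step (input_data : String) (input_list : List Int) : List String :=
  -- state: (result, total_len, start_no)
  ((PySem.List.pyRange 0 (input_list.length : Int) 1).foldl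
    (fun (st : List String × Int × Int) no =>
      let start_no := if no ≠ 0 then st.2.1 else st.2.2
      let end_len := PySem.List.pyGetD input_list no 0
      (st.1 ++ [String.ofList (PySem.List.slice input_data.toList (some start_no) (some (start_no + end_len)))],
       st.2.1 + end_len, start_no))
    ([], 0, 0)).1

-- ===== PORT B =====
-- helper 'cut' of Source B; Python's lst[:mid]/lst[mid:] are ported as take/drop,
-- exact here since 0 ≤ mid ≤ len lst; sum(left) is left.sum.
def pvCutB (d : List Char) : List Int → Int → List String
  | [], _ => []
  | [step], base => [String.ofList (PySem.List.slice d (some base) (some (base + step)))]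
  | a :: b :: rest, base =>
      let mid := (a :: b :: rest).length / 2
      let left := (a :: b :: rest).take mid
      let right := (a :: b :: rest).drop mid
      pvCutB d left base ++ pvCutB d right (base + left.sum)
termination_by l _ => l.length
decreasing_by
  · simp [List.length_take]; omega
  · simp; omega

def change_text_to_l1d_by_step_alt (input_data : String) (input_list : List Int) : List String :=
  pvCutB input_data.toList input_list 0

-- ===== PRECONDITION & SPEC =====
def Spec_change_text_to_l1d_by_step (input_data : String) (input_list : List Int) (out : List String) : Prop := out = change_text_to_l1d_by_step_alt input_data input_list
instance (input_data : String) (input_list : List Int) (out : List String) : Decidable (Spec_change_text_to_l1d_by_step input_data input_list out) := by unfold Spec_change_text_to_l1d_by_step; infer_instance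

-- ===== CLAIM (what is proved, stated in full; the proofs are below) =====
def Claim_equal_change_text_to_l1d_by_step : Prop := ∀ (input_data : String) (input_list : List Int), Dom_change_text_to_l1d_by_step input_data input_list → Spec_change_text_to_l1d_by_step input_data input_list (change_text_to_l1d_by_step input_data input_list)

-- ===== LEMMAS AND PROOFS =====

-- common characterisation: the chunks cut from d with step list l, starting at offset s
def pvChunks (d : List Char) (l : List Int) (s : Int) : List String :=
  match l with
  | [] => []
  | step :: rest =>
      String.ofList (PySem.List.slice d (some s) (some (s + step))) :: pvChunks d rest (s + step)

theorem pvA_tail (d : List Char) (L : List Int) :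
    ∀ (l' : List Int) (k : Nat), L.drop k = l' → 1 ≤ k →
    ∀ (res : List String) (T s : Int),
      ((PySem.List.pyRange (k : Int) (L.length : Int) 1).foldl
        (fun (st : List String × Int × Int) no =>
          let start_no := if no ≠ 0 then st.2.1 else st.2.2
          let end_len := PySem.List.pyGetD L no 0
          (st.1 ++ [String.ofList (PySem.List.slice d (some start_no) (some (start_no + end_len)))],
           st.2.1 + end_len, start_no))
        (res, T, s)).1 = res ++ pvChunks d l' T := by
  intro l'
  induction l' with
  | nil =>
      intro k hdrop _ res T s
      have hk : L.length ≤ k := by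
        by_contra h
        have := List.drop_eq_nil_iff.mp hdrop
        omega
      rw [PySem.List.pyRange_one_eq_nil (by exact_mod_cast hk)]
      simp [pvChunks]
  | cons e rest ih =>
      intro k hdrop hk res T s
      have hlt : k < L.length := by
        by_contra h
        rw [List.drop_eq_nil_iff.mpr (by omega)] at hdrop
        simp at hdrop
      have hsome : L[k]? = some e := by
        have h2 : (List.drop k L)[0]? = L[k + 0]? := List.getElem?_drop
        rw [hdrop] at h2
        simpa using h2.symm
      have hget : L.getD k 0 = e := by simp [List.getD, hsome]
      rw [PySem.List.pyRange_one_cons (by exact_mod_cast hlt)]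
      simp only [List.foldl_cons]
      have hne : (k : Int) ≠ 0 := by exact_mod_cast Nat.one_le_iff_ne_zero.mp hk
      have hcast : (k : Int) + 1 = ((k + 1 : Nat) : Int) := by push_cast; ring
      rw [hcast]
      have hdrop' : L.drop (k + 1) = rest := by
        rw [← List.drop_drop, hdrop]
        rfl
      simp only [hne, if_pos, ne_eq, not_false_iff, PySem.List.pyGetD_natCast, hget]
      rw [ih (k + 1) hdrop' (by omega)]
      simp [pvChunks, List.append_assoc]

theorem pvA_eq_chunks (s : String) (L : List Int) :
    change_text_to_l1d_by_step s L = pvChunks s.toList L 0 := by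
  unfold change_text_to_l1d_by_step
  cases L with
  | nil => simp [PySem.List.pyRange_one_eq_nil, pvChunks]
  | cons e rest =>
      have h0 : (0 : Int) < ((e :: rest).length : Int) := by
        exact_mod_cast Nat.succ_pos rest.length
      rw [PySem.List.pyRange_one_cons h0, List.foldl_cons]
      have h1 := pvA_tail s.toList (e :: rest) rest 1 rfl (by omega)
        [String.ofList (PySem.List.slice s.toList (some 0) (some (0 + e)))] (0 + e) 0
      simp only [ne_eq, not_true_eq_false, if_false, PySem.List.pyGetD_zero_cons] at h1 ⊢
      rw [show ((0 : Int) + 1) = ((1 : Nat) : Int) by norm_num]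
      rw [List.nil_append, h1]
      simp [pvChunks]

-- splitting the step list splits the chunks, shifting the right offset by the left sum
theorem pvChunks_append (d : List Char) (a b : List Int) :
    ∀ s, pvChunks d (a ++ b) s = pvChunks d a s ++ pvChunks d b (s + a.sum) := by
  induction a with
  | nil => intro s; simp [pvChunks]
  | cons e r ih =>
      intro s
      simp only [List.cons_append, pvChunks, ih, List.sum_cons]
      rw [show s + e + r.sum = s + (e + r.sum) by ring]

theorem pvB_eq_chunks (d : List Char) (l : List Int) (s : Int) :
    pvCutB d l s = pvChunks d l s := by
  fun_induction pvCutB d l s with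
  | case1 => simp [pvChunks]
  | case2 step base => simp [pvChunks]
  | case3 =>
      rename_i ih1 ih2
      rw [ih1, ih2, ← pvChunks_append, List.take_append_drop]

-- ===== VERDICT (by name: the statement is the Claim_ definition above) =====
theorem change_text_to_l1d_by_step_spec : Claim_equal_change_text_to_l1d_by_step := by
  intro input_data input_list _
  unfold Spec_change_text_to_l1d_by_step change_text_to_l1d_by_step_alt
  rw [pvA_eq_chunks, pvB_eq_chunks]
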